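-- pv_equiv track=rewrite | github.com/tomdu3/free-codecamp-challenges | daily_challenge_fcc/2026/2026-01/26-01-01/resolution_streak.py | resolution_streak
-- ===== SOURCE A (Python) =====
-- def resolution_streak(days):
--     streak = 0
--     failed_day = None
--     message = ""
--     for idx, day in enumerate(days):
--         if day[0] < 10000 or day[1] > 120 or day[2] < 5:
--             failed_day = idx + 1
--             message = "Resolution failed on day {}: {} day streak.".format(failed_day, streak)
--             break
--         else:
--             streak += 1
--             message = "Resolution on track: {} day streak.".format(streak)
--     return message
-- ===== SOURCE B (Python) =====
-- def resolution_streak(days):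
--     ok = [d[0] >= 10000 and d[1] <= 120 and d[2] >= 5 for d in days]
--     if all(ok):
--         return "Resolution on track: {} day streak.".format(len(days)) if days else ""
--     i = ok.index(False)
--     return "Resolution failed on day {}: {} day streak.".format(i + 1, i)
-- ===== Notes on version B (the rewrite author's own statement) =====
-- stated objective: alternative
-- what changed: Replaces A's single early-exit loop that rebuilds and overwrites the message each iteration with two staged passes: first map every day to a pass/fail boolean, then answer with all()/ok.index(False) over that boolean list and format the message once.
import Mathlib
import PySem

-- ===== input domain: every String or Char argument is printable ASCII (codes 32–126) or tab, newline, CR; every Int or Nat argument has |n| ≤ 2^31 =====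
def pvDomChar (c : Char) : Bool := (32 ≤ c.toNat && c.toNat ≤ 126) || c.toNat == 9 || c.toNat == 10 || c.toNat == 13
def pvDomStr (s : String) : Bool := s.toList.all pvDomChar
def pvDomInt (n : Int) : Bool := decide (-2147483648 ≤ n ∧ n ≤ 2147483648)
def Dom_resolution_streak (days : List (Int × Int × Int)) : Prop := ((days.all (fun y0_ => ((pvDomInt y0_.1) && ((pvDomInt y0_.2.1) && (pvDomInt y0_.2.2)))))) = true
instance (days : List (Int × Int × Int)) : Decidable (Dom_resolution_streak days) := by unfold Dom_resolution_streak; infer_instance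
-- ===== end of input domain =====

-- B replaces A's early-exit loop with two staged passes: map every day to a pass/fail boolean first, then answer with all/index on that boolean list (objective: simpler).

-- ===== PORT A =====
-- literal transliteration of A's loop: state (streak, message), enumerate index idx
def resolution_streak_loop (days : List (Int × Int × Int)) (idx : Int) (streak : Int) (message : String) : String :=
  match days with
  | [] => message
  | day :: rest =>
    if day.1 < 10000 ∨ day.2.1 > 120 ∨ day.2.2 < 5 then
      "Resolution failed on day " ++ PySem.Int.toStr (idx + 1) ++ ": " ++ PySem.Int.toStr streak ++ " day streak."
    else
      resolution_streak_loop rest (idx + 1) (streak + 1) ("Resolution on track: " ++ PySem.Int.toStr (streak + 1) ++ " day streak.")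

def resolution_streak (days : List (Int × Int × Int)) : String :=
  resolution_streak_loop days 0 0 ""

-- ===== PORT B =====
-- the per-day pass predicate of Source B's comprehension
def resolution_streak_ok (d : Int × Int × Int) : Bool :=
  decide (d.1 ≥ 10000) && decide (d.2.1 ≤ 120) && decide (d.2.2 ≥ 5)

def resolution_streak_alt (days : List (Int × Int × Int)) : String :=
  let ok := days.map resolution_streak_ok
  if ok.all id then
    if days.isEmpty then ""
    else "Resolution on track: " ++ PySem.Int.toStr (days.length : Int) ++ " day streak."
  else
    match PySem.List.index? ok false with
    | some i => "Resolution failed on day " ++ PySem.Int.toStr ((i : Int) + 1) ++ ": " ++ PySem.Int.toStr (i : Int) ++ " day streak."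
    | none => ""  -- unreachable: ¬ ok.all id means false ∈ ok

-- ===== PRECONDITION & SPEC =====
def Spec_resolution_streak (days : List (Int × Int × Int)) (out : String) : Prop := out = resolution_streak_alt days
instance (days : List (Int × Int × Int)) (out : String) : Decidable (Spec_resolution_streak days out) := by unfold Spec_resolution_streak; infer_instance

-- ===== CLAIM (what is proved, stated in full; the proofs are below) =====
def Claim_equal_resolution_streak : Prop := ∀ (days : List (Int × Int × Int)), Dom_resolution_streak days → Spec_resolution_streak days (resolution_streak days)

-- ===== LEMMAS AND PROOFS =====
def resolution_streak_fails (day : Int × Int × Int) : Bool :=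
  day.1 < 10000 || day.2.1 > 120 || day.2.2 < 5

theorem resolution_streak_ok_eq (d : Int × Int × Int) :
    resolution_streak_ok d = !resolution_streak_fails d := by
  rcases d with ⟨a, b, c⟩
  by_cases h1 : a < 10000 <;> by_cases h2 : b > 120 <;> by_cases h3 : c < 5 <;>
    simp [resolution_streak_ok, resolution_streak_fails, h1, h2, h3] <;> omega

theorem resolution_streak_loop_eq (days : List (Int × Int × Int)) (k : Nat) (msg : String) :
    resolution_streak_loop days (k : Int) (k : Int) msg =
      match days.findIdx? resolution_streak_fails with
      | some i => "Resolution failed on day " ++ PySem.Int.toStr ((k : Int) + (i : Int) + 1) ++ ": " ++ PySem.Int.toStr ((k : Int) + (i : Int)) ++ " day streak."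
      | none =>
        match days with
        | [] => msg
        | _ :: _ => "Resolution on track: " ++ PySem.Int.toStr ((k : Int) + (days.length : Int)) ++ " day streak." := by
  induction days generalizing k msg with
  | nil => simp [resolution_streak_loop]
  | cons d rest ih =>
    rw [List.findIdx?_cons]
    by_cases h : resolution_streak_fails d
    · have hcond : d.1 < 10000 ∨ d.2.1 > 120 ∨ d.2.2 < 5 := by
        simp [resolution_streak_fails] at h
        omega
      simp [resolution_streak_loop, hcond, h]
    · have hcond : ¬ (d.1 < 10000 ∨ d.2.1 > 120 ∨ d.2.2 < 5) := by
        simp [resolution_streak_fails] at h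
        omega
      rw [resolution_streak_loop, if_neg hcond]
      have hk : ((k : Int) + 1) = ((k + 1 : Nat) : Int) := by push_cast; ring
      rw [hk, ih (k + 1)]
      simp [h]
      cases hfi : rest.findIdx? resolution_streak_fails with
      | some i =>
        have : ((k : Int) + 1 + (i : Int)) = ((k : Int) + ((i + 1 : Nat) : Int)) := by push_cast; ring
        simp [this]
      | none =>
        cases rest with
        | nil => simp
        | cons x xs =>
          simp
          congr 1
          ring

theorem resolution_streak_index_eq (days : List (Int × Int × Int)) :
    PySem.List.index? (days.map resolution_streak_ok) false = days.findIdx? resolution_streak_fails := by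
  induction days with
  | nil => simp [PySem.List.index?_eq_idxOf?]
  | cons d rest ih =>
    rw [List.map_cons, List.findIdx?_cons]
    by_cases h : resolution_streak_fails d
    · have : resolution_streak_ok d = false := by rw [resolution_streak_ok_eq, h]; rfl
      rw [this, PySem.List.index?_cons_self, h]
      simp
    · have hok : resolution_streak_ok d = true := by rw [resolution_streak_ok_eq]; simp [h]
      rw [hok]
      have hne : (true : Bool) ≠ false := by decide
      rw [PySem.List.index?_cons_of_ne _ hne, ih]
      simp [h]

theorem resolution_streak_all_eq (days : List (Int × Int × Int)) :
    (days.map resolution_streak_ok).all id = (days.findIdx? resolution_streak_fails).isNone := by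
  induction days with
  | nil => simp
  | cons d rest ih =>
    rw [List.map_cons, List.findIdx?_cons, List.all_cons]
    by_cases h : resolution_streak_fails d
    · have : resolution_streak_ok d = false := by rw [resolution_streak_ok_eq, h]; rfl
      simp [this, h]
    · have hok : resolution_streak_ok d = true := by rw [resolution_streak_ok_eq]; simp [h]
      simp only [hok, h, Bool.true_and, id, ih]
      cases rest.findIdx? resolution_streak_fails <;> simp

theorem resolution_streak_alt_eq (days : List (Int × Int × Int)) :
    resolution_streak_alt days =
      match days.findIdx? resolution_streak_fails with
      | some i => "Resolution failed on day " ++ PySem.Int.toStr ((i : Int) + 1) ++ ": " ++ PySem.Int.toStr (i : Int) ++ " day streak."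
      | none =>
        match days with
        | [] => ""
        | _ :: _ => "Resolution on track: " ++ PySem.Int.toStr (days.length : Int) ++ " day streak." := by
  simp only [resolution_streak_alt]
  rw [resolution_streak_all_eq, resolution_streak_index_eq]
  cases hfi : days.findIdx? resolution_streak_fails with
  | some i => simp
  | none =>
    simp
    cases days with
    | nil => simp
    | cons x xs => simp

-- ===== VERDICT (by name: the statement is the Claim_ definition above) =====
theorem resolution_streak_spec : Claim_equal_resolution_streak := by
  intro days _
  unfold Spec_resolution_streak resolution_streak
  rw [resolution_streak_alt_eq]
  have h := resolution_streak_loop_eq days 0 ""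
  simp at h
  rw [h]
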